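-- pv_equiv track=rewrite | github.com/qiqi-impact/cp | binarysearch/563.py | solve
-- ===== SOURCE A (Python) =====
-- def solve(nums):
--     if not nums: return False
--     mxa = [nums[0]]
--     for i in range(1, len(nums)):
--         mxa.append(max(mxa[-1], nums[i]))
--     mn = nums[-1]
--     for i in range(len(nums)-1, 0, -1):
--         mn = min(mn, nums[i])
--         if mn > mxa[i-1]:
--             return True
--     return False
-- ===== SOURCE B (Python) =====
-- def solve(nums):
--     if len(nums) < 2:
--         return False
--     local_max = global_max = nums[0]
--     p = 0
--     for i in range(1, len(nums)):
--         if nums[i] <= local_max: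
--             p = i
--             local_max = global_max
--         elif nums[i] > global_max:
--             global_max = nums[i]
--     return p < len(nums) - 1
-- ===== Notes on version B (the rewrite author's own statement) =====
-- stated objective: faster
-- what changed: Replaces A's prefix-max table plus reverse suffix-min scan by a single forward greedy pass that maintains a partition pointer with local/global running maxima (no prefix array and no suffix minima computed at all) and answers from the final partition position.
import Mathlib
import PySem

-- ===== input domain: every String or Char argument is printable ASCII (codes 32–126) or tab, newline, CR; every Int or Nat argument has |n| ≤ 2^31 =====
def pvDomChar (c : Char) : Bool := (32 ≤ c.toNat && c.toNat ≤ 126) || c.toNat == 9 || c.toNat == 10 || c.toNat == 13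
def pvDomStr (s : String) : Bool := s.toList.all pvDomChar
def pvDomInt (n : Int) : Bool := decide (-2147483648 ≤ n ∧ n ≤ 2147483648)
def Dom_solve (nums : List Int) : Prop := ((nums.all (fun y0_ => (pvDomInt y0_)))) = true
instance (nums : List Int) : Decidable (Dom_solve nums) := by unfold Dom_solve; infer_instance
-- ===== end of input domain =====

-- B replaces A's prefix-max table + reverse suffix-min scan by a one-pass greedy
-- partition (local/global running maxima, O(1) extra space): different algorithm, measurably faster (no arrays allocated).


-- ===== PORT A =====
-- for i in range(1, len(nums)): mxa.append(max(mxa[-1], nums[i]))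
def solveBuildA (nums : List Int) (mxa : List Int) (i : Nat) : List Int :=
  if i < nums.length then
    solveBuildA nums (mxa ++ [max (mxa.getLast?.getD 0) (nums.getD i 0)]) (i + 1)
  else mxa
termination_by nums.length - i

-- for i in range(len(nums)-1, 0, -1): mn = min(mn, nums[i]); if mn > mxa[i-1]: return True
-- (k is the current index i; indices run k, k-1, …, 1, all in range)
def solveLoopA (nums mxa : List Int) (mn : Int) (k : Nat) : Bool :=
  match k with
  | 0 => false
  | j + 1 =>
    let mn' := min mn (nums.getD (j + 1) 0)
    if mxa.getD j 0 < mn' then true else solveLoopA nums mxa mn' j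

def solve (nums : List Int) : Bool :=
  if nums.isEmpty then false
  else
    let mxa := solveBuildA nums [nums.getD 0 0] 1
    let mn := nums.getD (nums.length - 1) 0   -- nums[-1]
    solveLoopA nums mxa mn (nums.length - 1)

-- ===== PORT B =====
-- for i in range(1, n): if nums[i] <= local: p=i; local=global  elif nums[i] > global: global=nums[i]
-- returns the final partition pointer p
def solveLoopB (nums : List Int) (p : Nat) (lo g : Int) (i : Nat) : Nat :=
  if i < nums.length then
    if nums.getD i 0 ≤ lo then
      solveLoopB nums i g g (i + 1)
    else if g < nums.getD i 0 then
      solveLoopB nums p lo (nums.getD i 0) (i + 1)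
    else
      solveLoopB nums p lo g (i + 1)
  else p
termination_by nums.length - i

def solve_alt (nums : List Int) : Bool :=
  if nums.length < 2 then false
  else decide (solveLoopB nums 0 (nums.getD 0 0) (nums.getD 0 0) 1 < nums.length - 1)

-- ===== PRECONDITION & SPEC =====
def Spec_solve (nums : List Int) (out : Bool) : Prop := out = solve_alt nums
instance (nums : List Int) (out : Bool) : Decidable (Spec_solve nums out) := by unfold Spec_solve; infer_instance

-- ===== CLAIM (what is proved, stated in full; the proofs are below) =====
def Claim_equal_solve : Prop := ∀ (nums : List Int), Dom_solve nums → Spec_solve nums (solve nums)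

-- ===== LEMMAS AND PROOFS =====

-- prefix maximum: max of nums[0..k]
def preM (nums : List Int) : Nat → Int
  | 0 => nums.getD 0 0
  | k + 1 => max (preM nums k) (nums.getD (k + 1) 0)

-- suffix minimum: min of nums[k..n-1]
def sufM (nums : List Int) (k : Nat) : Int :=
  if k + 1 < nums.length then min (nums.getD k 0) (sufM nums (k + 1)) else nums.getD k 0
termination_by nums.length - k

theorem sufM_rec (nums : List Int) (k : Nat) (h : k + 1 < nums.length) :
    sufM nums k = min (nums.getD k 0) (sufM nums (k + 1)) := by
  rw [sufM, if_pos h]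

theorem sufM_last (nums : List Int) (k : Nat) (h : ¬ k + 1 < nums.length) :
    sufM nums k = nums.getD k 0 := by
  rw [sufM, if_neg h]

theorem preM_mono (nums : List Int) (j k : Nat) (h : j ≤ k) :
    preM nums j ≤ preM nums k := by
  induction k with
  | zero => have : j = 0 := by omega
            subst this; exact le_rfl
  | succ m ih =>
    rcases Nat.lt_or_ge j (m + 1) with h1 | h1
    · exact le_trans (ih (by omega)) (by simp [preM])
    · have : j = m + 1 := by omega
      subst this; exact le_rfl

theorem sufM_le_getD (nums : List Int) (j k : Nat) (hjk : j ≤ k) (hk : k < nums.length) :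
    sufM nums j ≤ nums.getD k 0 := by
  obtain ⟨d, rfl⟩ : ∃ d, k = j + d := ⟨k - j, by omega⟩
  induction d generalizing j with
  | zero =>
    by_cases h : j + 1 < nums.length
    · rw [sufM_rec nums j h]
      simp [min_le_left]
    · rw [sufM_last nums j h]
      simp
  | succ m ih =>
    have h2 : j + 1 < nums.length := by omega
    rw [sufM_rec nums j h2]
    refine le_trans (min_le_right _ _) ?_
    have := ih (j + 1) (by omega) (by omega)
    simpa [Nat.add_assoc, Nat.add_comm, Nat.add_left_comm] using this

theorem lt_sufM_of_pointwise (nums : List Int) (x : Int) : ∀ (d j : Nat),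
    nums.length - j = d → j < nums.length →
    (∀ k, j ≤ k → k < nums.length → x < nums.getD k 0) → x < sufM nums j := by
  intro d
  induction d with
  | zero => intro j hd hj _; omega
  | succ m ih =>
    intro j hd hj hall
    by_cases h : j + 1 < nums.length
    · rw [sufM_rec nums j h]
      refine lt_min (hall j le_rfl hj) ?_
      exact ih (j + 1) (by omega) h (fun k hk1 hk2 => hall k (by omega) hk2)
    · rw [sufM_last nums j h]
      exact hall j le_rfl hj

-- getD of the mapped range
theorem getD_map_range (f : Nat → Int) (n j : Nat) (hj : j < n) :
    ((List.range n).map f).getD j 0 = f j := by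
  rw [List.getD_eq_getElem?_getD, List.getElem?_map, List.getElem?_range hj]
  rfl

theorem buildA_spec (nums : List Int) : ∀ (i : Nat) (mxa : List Int),
    1 ≤ i → mxa = (List.range i).map (preM nums) →
    solveBuildA nums mxa i = (List.range (max i nums.length)).map (preM nums) := by
  intro i mxa h1 hm
  induction mxa, i using solveBuildA.induct nums with
  | case1 mxa i hlt ih =>
    rw [solveBuildA, if_pos hlt]
    have hlast : mxa.getLast?.getD 0 = preM nums (i - 1) := by
      subst hm
      have hi : i - 1 < i := by omega
      rw [List.getLast?_eq_getElem?]
      simp only [List.length_map, List.length_range]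
      rw [List.getElem?_map, List.getElem?_range hi]
      rfl
    have hstep : mxa ++ [max (mxa.getLast?.getD 0) (nums.getD i 0)]
        = (List.range (i + 1)).map (preM nums) := by
      rw [hlast, hm, List.range_succ, List.map_append]
      have : preM nums i = max (preM nums (i - 1)) (nums.getD i 0) := by
        obtain ⟨j, rfl⟩ : ∃ j, i = j + 1 := ⟨i - 1, by omega⟩
        simp [preM]
      simp [this]
    rw [ih (by omega) hstep, max_eq_right (show i + 1 ≤ nums.length by omega),
      max_eq_right (show i ≤ nums.length by omega)]
  | case2 mxa i hge =>
    rw [solveBuildA, if_neg hge, hm, max_eq_left (show nums.length ≤ i by omega)]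

theorem loopA_iff (nums mxa : List Int) : ∀ (k : Nat) (mn : Int),
    k < nums.length → min mn (nums.getD k 0) = sufM nums k →
    (solveLoopA nums mxa mn k = true ↔
      ∃ j, 1 ≤ j ∧ j ≤ k ∧ mxa.getD (j - 1) 0 < sufM nums j) := by
  intro k
  induction k with
  | zero =>
    intro mn _ _
    simp [solveLoopA]
  | succ j ih =>
    intro mn hk hmn
    simp only [solveLoopA]
    by_cases hc : mxa.getD j 0 < min mn (nums.getD (j + 1) 0)
    · rw [if_pos hc]
      constructor
      · intro _
        exact ⟨j + 1, by omega, by omega, by rw [← hmn]; exact hc⟩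
      · intro _; rfl
    · rw [if_neg hc]
      by_cases hj : j = 0
      · subst hj
        simp only [solveLoopA]
        constructor
        · intro h; exact absurd h (by simp)
        · rintro ⟨x, h1, h2, h3⟩
          have hx : x = 1 := by omega
          subst hx
          exfalso
          apply hc
          rw [hmn]
          simpa using h3
      · have hrec : min (min mn (nums.getD (j + 1) 0)) (nums.getD j 0) = sufM nums j := by
          rw [sufM_rec nums j hk, ← hmn]
          exact min_comm _ _
        rw [ih (min mn (nums.getD (j + 1) 0)) (by omega) hrec]
        constructor
        · rintro ⟨x, h1, h2, h3⟩
          exact ⟨x, h1, by omega, h3⟩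
        · rintro ⟨x, h1, h2, h3⟩
          refine ⟨x, h1, ?_, h3⟩
          rcases Nat.lt_or_ge x (j + 1) with h | h
          · omega
          · exfalso
            have hx : x = j + 1 := by omega
            subst hx
            apply hc
            rw [hmn]
            simpa using h3

theorem solve_iff (nums : List Int) (hne : nums ≠ []) :
    (solve nums = true ↔
      ∃ j, 1 ≤ j ∧ j ≤ nums.length - 1 ∧ preM nums (j - 1) < sufM nums j) := by
  obtain ⟨x, rest, rfl⟩ : ∃ x rest, nums = x :: rest := by
    cases nums with
    | nil => exact absurd rfl hne
    | cons a l => exact ⟨a, l, rfl⟩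
  have hn : 1 ≤ (x :: rest).length := by simp
  have hmxa : solveBuildA (x :: rest) [(x :: rest).getD 0 0] 1
      = (List.range (x :: rest).length).map (preM (x :: rest)) := by
    have h := buildA_spec (x :: rest) 1 [(x :: rest).getD 0 0] le_rfl
      (by simp [List.range_one, preM])
    rwa [max_eq_right hn] at h
  have hk : (x :: rest).length - 1 < (x :: rest).length := by
    simp
  have hH : min ((x :: rest).getD ((x :: rest).length - 1) 0)
      ((x :: rest).getD ((x :: rest).length - 1) 0)
      = sufM (x :: rest) ((x :: rest).length - 1) := by
    rw [min_self, sufM_last _ _ (by omega)]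
  rw [solve, if_neg (by simp)]
  rw [hmxa, loopA_iff _ _ _ _ hk hH]
  apply exists_congr
  intro j
  constructor
  · rintro ⟨h1, h2, h3⟩
    refine ⟨h1, h2, ?_⟩
    rwa [getD_map_range _ _ _ (by omega)] at h3
  · rintro ⟨h1, h2, h3⟩
    refine ⟨h1, h2, ?_⟩
    rwa [getD_map_range _ _ _ (by omega)]

-- greedy loop invariant: the final partition pointer P is < n, every split index
-- j ≤ P has a killing witness, and every element strictly after P exceeds preM P
theorem loopB_spec (nums : List Int) : ∀ (p : Nat) (lo g : Int) (i : Nat),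
    1 ≤ i → i ≤ nums.length → p < i →
    lo = preM nums p → g = preM nums (i - 1) →
    (∀ j, 1 ≤ j → j ≤ p → ∃ k, j ≤ k ∧ k < i ∧ nums.getD k 0 ≤ preM nums (j - 1)) →
    (∀ k, p < k → k < i → lo < nums.getD k 0) →
    (solveLoopB nums p lo g i < nums.length ∧
     (∀ j, 1 ≤ j → j ≤ solveLoopB nums p lo g i →
        ∃ k, j ≤ k ∧ k < nums.length ∧ nums.getD k 0 ≤ preM nums (j - 1)) ∧
     (∀ k, solveLoopB nums p lo g i < k → k < nums.length →
        preM nums (solveLoopB nums p lo g i) < nums.getD k 0)) := by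
  intro p lo g i
  induction p, lo, g, i using solveLoopB.induct nums with
  | case1 p lo g i hlt hle ih =>
    intro h1 h2 h3 hlo hg hkill habove
    rw [solveLoopB, if_pos hlt, if_pos hle]
    have hpre : preM nums i = g := by
      obtain ⟨m, rfl⟩ : ∃ m, i = m + 1 := ⟨i - 1, by omega⟩
      simp only [Nat.add_sub_cancel] at hg
      have hx : nums.getD (m + 1) 0 ≤ preM nums m := by
        refine le_trans hle ?_
        rw [hlo, ← hg]
        rw [hg]
        exact preM_mono nums p m (by omega)
      simp only [preM]
      rw [max_eq_left hx, hg]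
    apply ih (by omega) (by omega) (by omega)
    · exact hpre.symm
    · simp only [Nat.add_sub_cancel]
      exact hpre.symm
    · intro j hj1 hj2
      rcases Nat.lt_or_ge p j with hc2 | hc
      case inr =>
        obtain ⟨k, hk1, hk2, hk3⟩ := hkill j hj1 hc
        exact ⟨k, hk1, by omega, hk3⟩
      refine ⟨i, by omega, by omega, ?_⟩
      calc nums.getD i 0 ≤ lo := hle
          _ = preM nums p := hlo
          _ ≤ preM nums (j - 1) := preM_mono nums p (j - 1) (by omega)
    · intro k hk1 hk2
      omega
  | case2 p lo g i hlt hle hg2 ih =>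
    intro h1 h2 h3 hlo hg hkill habove
    rw [solveLoopB, if_pos hlt, if_neg hle, if_pos hg2]
    apply ih (by omega) (by omega) (by omega) hlo
    · simp only [Nat.add_sub_cancel]
      obtain ⟨m, rfl⟩ : ∃ m, i = m + 1 := ⟨i - 1, by omega⟩
      simp only [Nat.add_sub_cancel] at hg
      simp only [preM]
      rw [max_eq_right (le_of_lt (hg ▸ hg2))]
    · intro j hj1 hj2
      obtain ⟨k, hk1, hk2, hk3⟩ := hkill j hj1 hj2
      exact ⟨k, hk1, by omega, hk3⟩
    · intro k hk1 hk2
      rcases Nat.lt_or_ge k i with hc | hc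
      · exact habove k hk1 hc
      · have hki : k = i := by omega
        subst hki
        omega
  | case3 p lo g i hlt hle hg2 ih =>
    intro h1 h2 h3 hlo hg hkill habove
    rw [solveLoopB, if_pos hlt, if_neg hle, if_neg hg2]
    apply ih (by omega) (by omega) (by omega) hlo
    · simp only [Nat.add_sub_cancel]
      obtain ⟨m, rfl⟩ : ∃ m, i = m + 1 := ⟨i - 1, by omega⟩
      simp only [Nat.add_sub_cancel] at hg
      simp only [preM]
      rw [max_eq_left (by omega), hg]
    · intro j hj1 hj2
      obtain ⟨k, hk1, hk2, hk3⟩ := hkill j hj1 hj2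
      exact ⟨k, hk1, by omega, hk3⟩
    · intro k hk1 hk2
      rcases Nat.lt_or_ge k i with hc | hc
      · exact habove k hk1 hc
      · have hki : k = i := by omega
        subst hki
        omega
  | case4 p lo g i hge =>
    intro h1 h2 h3 hlo hg hkill habove
    rw [solveLoopB, if_neg hge]
    have hi : i = nums.length := by omega
    subst hi
    refine ⟨h3, ?_, ?_⟩
    · intro j a b
      obtain ⟨k, x, y, z⟩ := hkill j a b
      exact ⟨k, x, by omega, z⟩
    · intro k a b
      rw [← hlo]
      exact habove k a b

theorem solve_alt_iff (nums : List Int) :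
    (solve_alt nums = true ↔
      ∃ j, 1 ≤ j ∧ j ≤ nums.length - 1 ∧ preM nums (j - 1) < sufM nums j) := by
  by_cases hlen : nums.length < 2
  · rw [solve_alt, if_pos hlen]
    simp only [Bool.false_eq_true, false_iff]
    rintro ⟨j, h1, h2, _⟩
    omega
  · rw [solve_alt, if_neg hlen]
    simp only [decide_eq_true_eq]
    obtain ⟨hP, hkill, habove⟩ :=
      loopB_spec nums 0 (nums.getD 0 0) (nums.getD 0 0) 1
        le_rfl (by omega) (by omega) (by simp [preM]) (by simp [preM])
        (by intro j h1 h2; omega) (by intro k h1 h2; omega)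
    constructor
    · intro hp
      refine ⟨solveLoopB nums 0 (nums.getD 0 0) (nums.getD 0 0) 1 + 1, by omega, by omega, ?_⟩
      simp only [Nat.add_sub_cancel]
      exact lt_sufM_of_pointwise nums _
        (nums.length - (solveLoopB nums 0 (nums.getD 0 0) (nums.getD 0 0) 1 + 1)) _ rfl (by omega)
        (fun k hk1 hk2 => habove k (by omega) hk2)
    · rintro ⟨j, h1, h2, h3⟩
      by_contra hc
      obtain ⟨k, hk1, hk2, hk3⟩ := hkill j h1 (by omega)
      have := sufM_le_getD nums j k hk1 hk2
      omega

-- ===== VERDICT (by name: the statement is the Claim_ definition above) =====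
theorem solve_spec : Claim_equal_solve := by
  intro nums _
  unfold Spec_solve
  rcases eq_or_ne nums [] with rfl | hne
  · simp [solve, solve_alt]
  · rw [Bool.eq_iff_iff, solve_iff nums hne, solve_alt_iff nums]
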